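/- GENERATED by tools/from_farm_form.py from prooffarm-gif/accepted/gif_decode.5/Proof.lean (a worked proof of the farm's unit `gif_decode.5`,
   accepted by the verdict) — do not edit. -/
import Gif.Spec.Units.gif_decode_5
import Gif.Spec.AllSegs
import Gif.Spec.Proved.gif_decode_5_Lemmas

open X86 X86.User Asan ProgX.Base ProgX.Base.Spec Gif.Spec

/-!
  `gif_decode.5` (0x10af93 … 0x10afdb, 17 instructions; gif_driver.c:223-226): `error = 0`, `DGifCloseFile(gif, &error)`, the
  three checked stores `report->close_result`, `report->close_error`, `report->consumed`. The call's return address 0x10afa8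
  (`ret28`) is a private cut (`gd5_AtRet28`); two walks (Lemmas.lean), chained here.
-/

/-- Segment 5 of `gif_decode` takes `Held` at 0x10af93 to `Done` at 0x10afdb, with the heap DGifCloseFile left. -/
theorem Gif.Spec.Proved.gif_decode_5_ok : Gif.Spec.gif_decode_5.Statement := by
  intro Lay hLay μ hμ u₀ hcode h_DGifCloseFile h_asan_store4_noabort h_asan_store8_noabort H rest frames Hc Fc e ret v hat
  -- DGifCloseFile's contract for the present heap and forest, the frame list of the body (the own frame in front) and THE READER
  -- OF THIS FRAME
  have hclose := h_DGifCloseFile Hc rest (gif_decode.framesIn frames e) Fc (gif_decode.reader e)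
  -- 0x10af93 … the call … 0x10afa8
  refine (Gif.Spec.gif_decode_5.gd5_seg_call Lay hLay μ hμ u₀ hcode H rest frames Hc Fc e ret hclose v hat).trans ?_
  -- 0x10afa8 … 0x10afdb
  intro v1 hv1
  exact Gif.Spec.gif_decode_5.gd5_seg_tail Lay hLay μ hμ u₀ hcode H rest frames e ret h_asan_store4_noabort
    h_asan_store8_noabort v1 hv1
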